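-- pv_equiv track=rewrite | github.com/bohyunshin/Algorithm_training | BOJ/BF/16198번 에너지 모으기.py | go
-- ===== SOURCE A (Python) =====
-- def go(x,W,ans):
--     if len(W) == 2:
--         ans.append(x)
--         return
--     n = len(W)
--     for i in range(1,n-1):
--         go(x+W[i-1]*W[i+1],[j for index,j in enumerate(W) if index != i],ans)
--     return ans
-- ===== SOURCE B (Python) =====
-- def go(x, W, ans):
--     if len(W) == 2:
--         ans.append(x)
--         return
--     stack = [(x, W)]
--     while stack:
--         x, W = stack.pop()
--         if len(W) == 2:
--             ans.append(x)
--         else: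
--             n = len(W)
--             stack.extend((x + W[i - 1] * W[i + 1], W[:i] + W[i + 1:])
--                          for i in range(n - 2, 0, -1))
--     return ans
-- ===== Notes on version B (the rewrite author's own statement) =====
-- stated objective: alternative
-- what changed: The recursive DFS is replaced by an iterative traversal with an explicit stack of (x, W) frames, children built by slicing (W[:i]+W[i+1:]) instead of an enumerate-filter comprehension and pushed in reverse i order so pops reproduce the left-to-right leaf order.
import Mathlib
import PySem

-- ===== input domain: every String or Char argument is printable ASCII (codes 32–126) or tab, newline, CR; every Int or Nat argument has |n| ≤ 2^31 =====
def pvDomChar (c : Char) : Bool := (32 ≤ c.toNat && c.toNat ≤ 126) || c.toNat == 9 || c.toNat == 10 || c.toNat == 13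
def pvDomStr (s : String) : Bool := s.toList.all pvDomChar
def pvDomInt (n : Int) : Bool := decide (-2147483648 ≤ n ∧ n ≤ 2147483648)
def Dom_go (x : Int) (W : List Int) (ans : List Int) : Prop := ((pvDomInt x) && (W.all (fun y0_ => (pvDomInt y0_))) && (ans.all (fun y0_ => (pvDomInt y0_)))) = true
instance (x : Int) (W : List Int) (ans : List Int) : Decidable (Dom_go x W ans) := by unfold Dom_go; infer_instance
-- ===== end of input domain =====

-- B replaces A's recursive DFS by an iterative explicit-stack traversal (same leaf order, same
-- cost); both A and B mutate `ans` in place identically, and the theorems are about the return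
-- value (none when len(W)==2, otherwise the final `ans`).

-- ===== PORT A =====
-- the child list [j for index,j in enumerate(W) if index != i] equals take/drop around index i
-- (needed by goRun's termination proof, cited by name in decreasing_by)
theorem filterEnum_all {α : Type} (W : List α) (s i : Int) (h : i < s) :
    ((PySem.List.enumerate W s).filter (fun p => p.1 != i)).map (·.2) = W := by
  induction W generalizing s with
  | nil => simp [PySem.List.enumerate_nil]
  | cons a t ih =>
    have hne : s ≠ i := by omega
    simp [PySem.List.enumerate_cons, hne, ih (s + 1) (by omega)]

theorem filterEnum {α : Type} (W : List α) (s i : Int) (hs : s ≤ i) :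
    ((PySem.List.enumerate W s).filter (fun p => p.1 != i)).map (·.2)
      = W.take (i - s).toNat ++ W.drop ((i - s).toNat + 1) := by
  induction W generalizing s with
  | nil => simp [PySem.List.enumerate_nil]
  | cons a t ih =>
    by_cases h : s = i
    · subst h
      simp [PySem.List.enumerate_cons, filterEnum_all t (s + 1) s (by omega)]
    · have hk : (i - s).toNat = (i - (s + 1)).toNat + 1 := by omega
      simp [PySem.List.enumerate_cons, h, ih (s + 1) (by omega), hk]

def goRunMeasure (W : List Int) : Nat := W.length.factorial

theorem goRun_dec {W : List Int} {i : Int}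
    (hi : i ∈ PySem.List.pyRange 1 ((W.length : Int) - 1) 1) :
    goRunMeasure (((PySem.List.enumerate W 0).filter (fun p => p.1 != i)).map (·.2))
      < goRunMeasure W := by
  rw [PySem.List.mem_pyRange_one] at hi
  unfold goRunMeasure
  rw [filterEnum W 0 i (by omega)]
  have hlen : ((W.take (i - 0).toNat) ++ W.drop ((i - 0).toNat + 1)).length = W.length - 1 := by
    simp [List.length_take, List.length_drop]
    omega
  rw [hlen]
  exact (Nat.factorial_lt (by omega)).2 (by omega)

def goRun (x : Int) (W : List Int) (ans : List Int) : List Int :=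
  if W.length = 2 then ans ++ [x]
  else
    -- for i in range(1, n-1): go(x + W[i-1]*W[i+1], [j for index,j in enumerate(W) if index != i], ans)
    (PySem.List.pyRange 1 ((W.length : Int) - 1) 1).attach.foldl
      (fun acc i =>
        goRun (x + PySem.List.pyGetD W (i.1 - 1) 0 * PySem.List.pyGetD W (i.1 + 1) 0)
          (((PySem.List.enumerate W 0).filter (fun p => p.1 != i.1)).map (·.2)) acc)
      ans
termination_by goRunMeasure W
decreasing_by exact goRun_dec i.2

def go (x : Int) (W : List Int) (ans : List Int) : Option (List Int) :=
  if W.length = 2 then none else some (goRun x W ans)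

-- ===== PORT B =====
-- the items stack.extend pushes, in the generator's order (i = n-2 down to 1)
def goChildren (x : Int) (W : List Int) : List (Int × List Int) :=
  (PySem.List.pyRange ((W.length : Int) - 2) 0 (-1)).map
    (fun i => (x + PySem.List.pyGetD W (i - 1) 0 * PySem.List.pyGetD W (i + 1) 0,
               PySem.List.slice W none (some i) ++ PySem.List.slice W (some (i + 1)) none))

-- stack measure for the while-loop's termination (cited by name in decreasing_by)
def stackMeasure (st : List (Int × List Int)) : Nat :=
  (st.map (fun p => p.2.length.factorial)).sum

theorem child_len (W : List Int) (i : Int) (h1 : 0 < i) (h2 : i ≤ (W.length : Int) - 2) :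
    (PySem.List.slice W none (some i) ++ PySem.List.slice W (some (i + 1)) none).length
      = W.length - 1 := by
  rw [PySem.List.slice_to W (by omega), PySem.List.slice_from W (by omega)]
  simp [List.length_take, List.length_drop]
  omega

theorem goLoop_dec1 {x : Int} {W : List Int} {rest : List (Int × List Int)} :
    stackMeasure rest < stackMeasure ((x, W) :: rest) := by
  have := Nat.factorial_pos W.length
  simp [stackMeasure]
  omega

theorem goLoop_dec2 {x : Int} {W : List Int} {rest : List (Int × List Int)} :
    stackMeasure ((goChildren x W).reverse ++ rest) < stackMeasure ((x, W) :: rest) := by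
  have hkey : stackMeasure (goChildren x W) < W.length.factorial := by
    unfold stackMeasure goChildren
    rw [List.map_map]
    by_cases hn : (W.length : Int) - 2 ≤ 0
    · rw [PySem.List.pyRange_neg_one_eq_nil hn]
      simpa using Nat.factorial_pos W.length
    · have hcongr : ((PySem.List.pyRange ((W.length : Int) - 2) 0 (-1)).map
          ((fun p => p.2.length.factorial) ∘
            (fun i => (x + PySem.List.pyGetD W (i - 1) 0 * PySem.List.pyGetD W (i + 1) 0,
              PySem.List.slice W none (some i) ++ PySem.List.slice W (some (i + 1)) none))))
          = (PySem.List.pyRange ((W.length : Int) - 2) 0 (-1)).map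
              (Function.const Int (W.length - 1).factorial) := by
        apply List.map_congr_left
        intro i hi
        rw [PySem.List.mem_pyRange_neg_one] at hi
        simp [Function.comp, Function.const, child_len W i hi.1 hi.2]
      rw [hcongr, List.map_const, List.sum_replicate, PySem.List.length_pyRange_neg_one,
        smul_eq_mul]
      calc ((W.length : Int) - 2 - 0).toNat * (W.length - 1).factorial
          < W.length * (W.length - 1).factorial := by
            apply Nat.mul_lt_mul_of_lt_of_le _ (le_refl _) (Nat.factorial_pos _)
            omega
        _ = W.length.factorial := Nat.mul_factorial_pred (by omega)
  have h2 : stackMeasure ((goChildren x W).reverse ++ rest)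
      = stackMeasure (goChildren x W) + stackMeasure rest := by
    simp [stackMeasure]
  have h3 : stackMeasure ((x, W) :: rest) = W.length.factorial + stackMeasure rest := by
    simp [stackMeasure]
  omega

-- the while-loop; the Lean list's head is the Python list's end (stack.pop() = head,
-- stack.extend(seq) = seq.reverse ++ stack)
def goLoop (stack : List (Int × List Int)) (ans : List Int) : List Int :=
  match stack with
  | [] => ans
  | (x, W) :: rest =>
    if W.length = 2 then goLoop rest (ans ++ [x])
    else goLoop ((goChildren x W).reverse ++ rest) ans
termination_by stackMeasure stack
decreasing_by
  · exact goLoop_dec1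
  · exact goLoop_dec2

def go_alt (x : Int) (W : List Int) (ans : List Int) : Option (List Int) :=
  if W.length = 2 then none else some (goLoop [(x, W)] ans)

-- ===== PRECONDITION & SPEC =====
def Spec_go (x : Int) (W : List Int) (ans : List Int) (out : Option (List Int)) : Prop := out = go_alt x W ans
instance (x : Int) (W : List Int) (ans : List Int) (out : Option (List Int)) : Decidable (Spec_go x W ans out) := by unfold Spec_go; infer_instance

-- ===== CLAIM (what is proved, stated in full; the proofs are below) =====
def Claim_equal_go : Prop := ∀ (x : Int) (W : List Int) (ans : List Int), Dom_go x W ans → Spec_go x W ans (go x W ans)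

-- ===== LEMMAS AND PROOFS =====

-- processing one stack frame has the same effect on ans as A's whole recursion on that frame
theorem children_reverse_foldl (x : Int) (W : List Int) (ans : List Int)
    (h : ¬ W.length = 2) :
    (goChildren x W).reverse.foldl (fun a p => goRun p.1 p.2 a) ans = goRun x W ans := by
  rw [goRun]
  rw [if_neg h]
  rw [List.foldl_attach (f := fun acc v => goRun
    (x + PySem.List.pyGetD W (v - 1) 0 * PySem.List.pyGetD W (v + 1) 0)
    (((PySem.List.enumerate W 0).filter (fun p => p.1 != v)).map (·.2)) acc)]
  unfold goChildren
  have he : (W.length : Int) - 2 + 1 = (W.length : Int) - 1 := by ring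
  rw [PySem.List.pyRange_neg_one_eq_reverse, zero_add, he, List.map_reverse,
    List.reverse_reverse, List.foldl_map]
  apply PySem.List.foldl_congr_mem
  intro acc i hi
  rw [PySem.List.mem_pyRange_one] at hi
  have hslice : PySem.List.slice W none (some i) ++ PySem.List.slice W (some (i + 1)) none
      = ((PySem.List.enumerate W 0).filter (fun p => p.1 != i)).map (·.2) := by
    rw [filterEnum W 0 i (by omega), PySem.List.slice_to W (by omega),
      PySem.List.slice_from W (by omega)]
    have h1 : (i - 0 : Int) = i := by ring
    have h2 : (i + 1).toNat = i.toNat + 1 := by omega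
    rw [h1, h2]
  rw [hslice]

theorem goLoop_foldl (st : List (Int × List Int)) (ans : List Int) :
    goLoop st ans = st.foldl (fun a p => goRun p.1 p.2 a) ans := by
  induction st, ans using goLoop.induct with
  | case1 ans => simp [goLoop]
  | case2 ans x W rest h ih =>
    rw [goLoop, if_pos h, ih, List.foldl_cons]
    have : goRun x W ans = ans ++ [x] := by rw [goRun, if_pos h]
    rw [this]
  | case3 ans x W rest h ih =>
    rw [goLoop, if_neg h, ih, List.foldl_append, List.foldl_cons,
      children_reverse_foldl x W ans h]

-- ===== VERDICT (by name: the statement is the Claim_ definition above) =====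
theorem go_spec : Claim_equal_go := by
  intro x W ans _
  unfold Spec_go go go_alt
  by_cases h : W.length = 2
  · rw [if_pos h, if_pos h]
  · rw [if_neg h, if_neg h, goLoop_foldl, List.foldl_cons, List.foldl_nil]
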